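-- pv_equiv track=rewrite | github.com/RohanAnandPandit/Haskell-Evaluator | src/Haskell_Evaluate.py | isTuple
-- ===== SOURCE A (Python) =====
-- def isTuple(exp):
--     lists = 0
--     for char in exp:
--         if (char == ','):
--             if (lists == 0):
--                 return True
--         if (char in ['[', '(']):
--             lists += 1
--         elif (char in [']', ')']):
--             lists -= 1
--     return False
-- ===== SOURCE B (Python) =====
-- def isTuple(exp):
--     # Two-pass decomposition: build the prefix-depth sequence, then check commas at depth 0.
--     depths = [0]
--     for ch in exp:
--         depths.append(depths[-1] + (1 if ch in '[(' else -1 if ch in '])' else 0))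
--     return any(ch == ',' and d == 0 for ch, d in zip(exp, depths))
-- ===== Notes on version B (the rewrite author's own statement) =====
-- stated objective: alternative
-- what changed: Replaces the single early-returning counter loop by a two-pass decomposition: first build the prefix-depth sequence (char -> +1/-1/0 delta, running sum), then check whether any comma is paired with prefix-depth 0.
import Mathlib
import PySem

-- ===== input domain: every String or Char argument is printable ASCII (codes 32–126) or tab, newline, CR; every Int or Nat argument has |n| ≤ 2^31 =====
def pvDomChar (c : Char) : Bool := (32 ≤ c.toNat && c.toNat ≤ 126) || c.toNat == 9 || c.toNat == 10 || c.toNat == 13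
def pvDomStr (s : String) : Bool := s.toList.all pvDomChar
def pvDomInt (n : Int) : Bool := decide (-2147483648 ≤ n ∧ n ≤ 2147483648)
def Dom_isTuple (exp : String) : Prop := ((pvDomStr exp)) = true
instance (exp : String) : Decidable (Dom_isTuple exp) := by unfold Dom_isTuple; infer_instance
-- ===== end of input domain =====

-- B replaces A's early-returning counter loop by a two-pass decomposition (prefix-depth sequence, then a comma-at-depth-0 check); objective: alternative, same cost.


-- ===== PORT A =====
-- A's loop: early return on a comma at depth 0, otherwise update the counter.
def isTupleGoA : List Char → Int → Bool
  | [], _ => false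
  | c :: rest, lists =>
    if c = ',' ∧ lists = 0 then true
    else if c = '[' ∨ c = '(' then isTupleGoA rest (lists + 1)
    else if c = ']' ∨ c = ')' then isTupleGoA rest (lists - 1)
    else isTupleGoA rest lists

def isTuple (exp : String) : Bool := isTupleGoA exp.toList 0

-- ===== PORT B =====
-- depth delta of one character
def pvDelta (c : Char) : Int :=
  if c = '[' ∨ c = '(' then 1 else if c = ']' ∨ c = ')' then -1 else 0

-- prefix-depth sequence (depths[0] = 0, depths[i+1] = depths[i] + delta), as Source B builds it
def pvDepths (l : List Char) : List Int := l.scanl (fun d c => d + pvDelta c) 0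

def isTuple_alt (exp : String) : Bool :=
  ((exp.toList).zip (pvDepths exp.toList)).any (fun p => p.1 = ',' ∧ p.2 = 0)

-- ===== PRECONDITION & SPEC =====
def Spec_isTuple (exp : String) (out : Bool) : Prop := out = isTuple_alt exp
instance (exp : String) (out : Bool) : Decidable (Spec_isTuple exp out) := by unfold Spec_isTuple; infer_instance

-- ===== CLAIM (what is proved, stated in full; the proofs are below) =====
def Claim_equal_isTuple : Prop := ∀ (exp : String), Dom_isTuple exp → Spec_isTuple exp (isTuple exp)

-- ===== LEMMAS AND PROOFS =====
theorem isTupleGoA_eq_any (l : List Char) (d : Int) :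
    isTupleGoA l d = (l.zip (l.scanl (fun d c => d + pvDelta c) d)).any (fun p => p.1 = ',' ∧ p.2 = 0) := by
  induction l generalizing d with
  | nil => simp [isTupleGoA]
  | cons c rest ih =>
    rw [List.scanl_cons, List.zip_cons_cons, List.any_cons, ← ih]
    by_cases h1 : c = ',' ∧ d = 0
    · simp [isTupleGoA, h1]
    · by_cases h2 : c = '[' ∨ c = '('
      · have hc : ¬ (c = ',') := by rcases h2 with h | h <;> simp [h]
        simp [isTupleGoA, h2, pvDelta, hc]
      · by_cases h3 : c = ']' ∨ c = ')'
        · have hc : ¬ (c = ',') := by rcases h3 with h | h <;> simp [h]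
          simp [isTupleGoA, h2, h3, pvDelta, hc, Int.sub_eq_add_neg]
        · by_cases hc : c = ','
          · have hd : ¬ (d = 0) := fun hd => h1 ⟨hc, hd⟩
            simp [isTupleGoA, pvDelta, hc, hd]
          · simp [isTupleGoA, h2, h3, pvDelta, hc]

-- ===== VERDICT (by name: the statement is the Claim_ definition above) =====
theorem isTuple_spec : Claim_equal_isTuple := by
  intro exp _
  unfold Spec_isTuple isTuple isTuple_alt pvDepths
  exact isTupleGoA_eq_any exp.toList 0
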